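-- pv_equiv track=rewrite | github.com/haowjy/meridian-channel | src/meridian/lib/ops/run.py | _normalize_skill_flags
-- ===== SOURCE A (Python) =====
-- def _normalize_skill_flags(skill_flags: tuple[str, ...]) -> tuple[str, ...]:
--     parsed: list[str] = []
--     for flag in skill_flags:
--         for candidate in flag.split(","):
--             normalized = candidate.strip()
--             if normalized:
--                 parsed.append(normalized)
--     return tuple(parsed)
-- ===== SOURCE B (Python) =====
-- def _normalize_skill_flags(skill_flags):
--     parsed = []
--     for flag in skill_flags:
--         cur = ""   # current token, leading whitespace never enters it
--         pend = ""  # whitespace seen after the token started; kept only if more token follows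
--         for ch in flag:
--             if ch == ',':
--                 if cur:
--                     parsed.append(cur)
--                 cur = ""
--                 pend = ""
--             elif ch.isspace():
--                 if cur:
--                     pend += ch
--             else:
--                 cur = cur + pend + ch
--                 pend = ""
--         if cur:
--             parsed.append(cur)
--     return tuple(parsed)
-- ===== Notes on version B (the rewrite author's own statement) =====
-- stated objective: alternative
-- what changed: Replaces split(',')/strip()/filter with a single character-level state machine that builds each token in place: a comma flushes the current token, interior whitespace is buffered and only committed when another token character follows, so stripping never happens as a separate pass.
import Mathlib
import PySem

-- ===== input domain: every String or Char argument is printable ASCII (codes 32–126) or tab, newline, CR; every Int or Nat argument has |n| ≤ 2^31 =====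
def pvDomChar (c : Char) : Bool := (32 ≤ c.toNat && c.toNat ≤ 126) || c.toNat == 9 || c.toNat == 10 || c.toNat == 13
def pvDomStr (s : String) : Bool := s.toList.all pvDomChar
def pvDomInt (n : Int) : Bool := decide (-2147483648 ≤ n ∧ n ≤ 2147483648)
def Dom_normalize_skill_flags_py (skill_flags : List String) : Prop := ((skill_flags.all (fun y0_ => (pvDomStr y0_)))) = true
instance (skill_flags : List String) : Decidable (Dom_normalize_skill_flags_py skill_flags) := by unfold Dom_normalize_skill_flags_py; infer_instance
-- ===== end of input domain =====

-- B replaces A's split/strip passes by a single character-level state machine that builds each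
-- token in place (buffered interior whitespace, committed only when more token follows); same cost.

-- ===== PORT A =====
-- A: for flag in skill_flags: for candidate in flag.split(","): strip, append if non-empty.
def normalize_skill_flags_py (skill_flags : List String) : List String :=
  skill_flags.foldl (fun parsed flag =>
    ((PySem.Str.split? flag ",").getD []).foldl (fun parsed candidate =>
      let normalized := PySem.Str.strip candidate
      if normalized ≠ "" then parsed ++ [normalized] else parsed) parsed) []

-- ===== PORT B =====
-- B: per character: ',' flushes the current token; whitespace is buffered (dropped if no token
-- has started); any other char commits the buffered whitespace and extends the token.
def nsfStep (st : List String × List Char × List Char) (ch : Char) :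
    List String × List Char × List Char :=
  let (parsed, cur, pend) := st
  if ch = ',' then
    (if cur ≠ [] then parsed ++ [String.ofList cur] else parsed, [], [])
  else if PySem.Chars.isspace ch then
    (parsed, cur, if cur ≠ [] then pend ++ [ch] else pend)
  else
    (parsed, cur ++ pend ++ [ch], [])

def nsfFlag (parsed : List String) (flag : String) : List String :=
  let st := flag.toList.foldl nsfStep (parsed, [], [])
  if st.2.1 ≠ [] then st.1 ++ [String.ofList st.2.1] else st.1

def normalize_skill_flags_py_alt (skill_flags : List String) : List String :=
  skill_flags.foldl nsfFlag []

-- ===== PRECONDITION & SPEC =====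
def Spec_normalize_skill_flags_py (skill_flags : List String) (out : List String) : Prop := out = normalize_skill_flags_py_alt skill_flags
instance (skill_flags : List String) (out : List String) : Decidable (Spec_normalize_skill_flags_py skill_flags out) := by unfold Spec_normalize_skill_flags_py; infer_instance

-- ===== CLAIM (what is proved, stated in full; the proofs are below) =====
def Claim_equal_normalize_skill_flags_py : Prop := ∀ (skill_flags : List String), Dom_normalize_skill_flags_py skill_flags → Spec_normalize_skill_flags_py skill_flags (normalize_skill_flags_py skill_flags)

-- ===== LEMMAS AND PROOFS =====

-- splitComma cs = cs.split(",") as a structural recursion (proof-side spec of Chars.splitOn · [','])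
def splitComma : List Char → List (List Char)
  | [] => [[]]
  | c :: rest => if c = ',' then [] :: splitComma rest
                 else (splitComma rest).modifyHead (fun t => c :: t)

theorem splitComma_ne_nil (cs : List Char) : splitComma cs ≠ [] := by
  cases cs with
  | nil => simp [splitComma]
  | cons c rest =>
    simp only [splitComma]
    split
    · simp
    · cases h : splitComma rest with
      | nil => exact absurd h (splitComma_ne_nil rest)
      | cons a t => simp [List.modifyHead]

theorem modifyHead_append {α : Type} (f : α → α) (l l' : List α) (h : l ≠ []) :
    (l ++ l').modifyHead f = l.modifyHead f ++ l' := by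
  cases l with
  | nil => exact absurd rfl h
  | cons a t => simp [List.modifyHead]

theorem splitOn_go_eq (cs : List Char) : ∀ (fuel : Nat) (cur : List Char) (acc : List (List Char)),
    cs.length ≤ fuel →
    PySem.Chars.splitOn.go [','] fuel cs cur acc
      = acc.reverse ++ (splitComma cs).modifyHead (fun t => cur.reverse ++ t) := by
  induction cs with
  | nil =>
    intro fuel cur acc _
    cases fuel <;> simp [PySem.Chars.splitOn.go, splitComma, List.modifyHead]
  | cons c rest ih =>
    intro fuel cur acc hf
    cases fuel with
    | zero => simp at hf
    | succ fuel =>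
      rw [PySem.Chars.splitOn.go.eq_def]
      simp only [List.isPrefixOf, List.length_cons] at hf ⊢
      by_cases hc : c = ','
      · subst hc
        simp only [beq_self_eq_true, Bool.true_and,
          if_true, List.length_nil, Nat.zero_add, List.drop_succ_cons, List.drop_zero]
        rw [ih fuel [] (cur.reverse :: acc) (by omega)]
        cases h : splitComma rest with
        | nil => exact absurd h (splitComma_ne_nil rest)
        | cons a t => simp [splitComma, h, List.modifyHead]
      · rw [if_neg (by simp; exact fun h => hc h.symm)]
        rw [ih fuel (c :: cur) acc (by omega)]
        congr 1
        simp only [splitComma, if_neg hc]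
        rw [List.modifyHead_modifyHead]
        congr 1
        funext t
        simp

theorem splitOn_comma (cs : List Char) :
    PySem.Chars.splitOn cs [','] = splitComma cs := by
  unfold PySem.Chars.splitOn
  rw [splitOn_go_eq cs (cs.length + 1) [] [] (by omega)]
  cases h : splitComma cs with
  | nil => exact absurd h (splitComma_ne_nil cs)
  | cons a t => simp [List.modifyHead]

theorem splitComma_append (a b : List Char) :
    splitComma (a ++ ',' :: b) = splitComma a ++ splitComma b := by
  induction a with
  | nil => simp [splitComma]
  | cons c a' ih =>
    by_cases hc : c = ','
    · subst hc; simp [splitComma, ih]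
    · simp only [List.cons_append, splitComma, if_neg hc, ih]
      rw [modifyHead_append _ _ _ (splitComma_ne_nil a')]

theorem splitComma_no_comma (xs : List Char) (h : ∀ c ∈ xs, c ≠ ',') :
    splitComma xs = [xs] := by
  induction xs with
  | nil => rfl
  | cons c t ih =>
    simp only [splitComma, if_neg (h c (by simp))]
    rw [ih (fun c hc => h c (by simp [hc]))]
    rfl

-- pieces cs = the stripped non-empty pieces of cs.split(",") (char level)
def pieces (cs : List Char) : List (List Char) :=
  ((splitComma cs).map PySem.Chars.strip).filter (fun t => !t.isEmpty)

theorem strip_ofList (cs : List Char) :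
    PySem.Str.strip (String.ofList cs) = String.ofList (PySem.Chars.strip cs) := by
  have h := PySem.Str.toList_strip (String.ofList cs)
  rw [String.toList_ofList] at h
  rw [← h, String.ofList_toList]

theorem split_getD (s : String) :
    ((PySem.Str.split? s ",").getD []) = (splitComma s.toList).map String.ofList := by
  simp [PySem.Str.split?, PySem.Chars.split?, splitOn_comma]

-- A's inner loop appends the stripped non-empty pieces of one flag
theorem inner_loop_eq (cands : List String) (acc : List String) :
    cands.foldl (fun parsed candidate =>
      let normalized := PySem.Str.strip candidate
      if normalized ≠ "" then parsed ++ [normalized] else parsed) acc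
    = acc ++ ((cands.map PySem.Str.strip).filter (fun token => token ≠ "")) := by
  induction cands generalizing acc with
  | nil => simp
  | cons c t ih =>
    simp only [List.foldl_cons, List.map_cons, List.filter_cons]
    by_cases h : PySem.Str.strip c ≠ ""
    · simp only [if_pos h, ih, decide_eq_true h, List.append_assoc, List.singleton_append]
      simp
    · simp only [if_neg h]
      rw [ih]
      simp at h
      simp [h]

-- the map-strip-filter pipeline over String.ofList pieces, pushed down to char level
theorem pipeline_eq (l : List (List Char)) :
    (((l.map String.ofList).map PySem.Str.strip).filter (fun token => token ≠ ""))
      = ((l.map PySem.Chars.strip).filter (fun t => !t.isEmpty)).map String.ofList := by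
  have hcomp : (PySem.Str.strip ∘ String.ofList) = (String.ofList ∘ PySem.Chars.strip) := by
    funext cs; simp [strip_ofList]
  rw [List.map_map, hcomp, ← List.map_map, List.filter_map]
  congr 1
  apply List.filter_congr
  intro x _
  cases x <;> simp [Function.comp]

-- A as a flatMap of per-flag pieces
theorem portA_eq (skill_flags : List String) (acc : List String) :
    skill_flags.foldl (fun parsed flag =>
      ((PySem.Str.split? flag ",").getD []).foldl (fun parsed candidate =>
        let normalized := PySem.Str.strip candidate
        if normalized ≠ "" then parsed ++ [normalized] else parsed) parsed) acc
    = acc ++ skill_flags.flatMap (fun flag => (pieces flag.toList).map String.ofList) := by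
  induction skill_flags generalizing acc with
  | nil => simp
  | cons f t ih =>
    simp only [List.foldl_cons, List.flatMap_cons]
    rw [inner_loop_eq, ih, split_getD, List.append_assoc]
    congr 2
    rw [pipeline_eq]
    simp [pieces]

-- ===== B-side lemmas =====

-- the flush at the end of B's scan (the trailing 'if cur: parsed.append(cur)')
def nsfFinish (st : List String × List Char × List Char) : List String :=
  if st.2.1 ≠ [] then st.1 ++ [String.ofList st.2.1] else st.1

-- invariants of B's scan state
def nsfInv (cur pend : List Char) : Prop :=
  (∀ c ∈ cur, c ≠ ',') ∧ (∀ c ∈ pend, PySem.Chars.isspace c = true) ∧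
  (cur = [] → pend = []) ∧
  (∀ h ∈ cur.head?, PySem.Chars.isspace h = false) ∧
  (∀ h ∈ cur.getLast?, PySem.Chars.isspace h = false)

theorem nsfInv_nil : nsfInv [] [] := ⟨by simp, by simp, by simp, by simp, by simp⟩

theorem strip_affix (cur pend : List Char) (hinv : nsfInv cur pend) :
    PySem.Chars.strip (cur ++ pend) = cur := by
  obtain ⟨_, hws, hemp, hhead, hlast⟩ := hinv
  cases hc : cur with
  | nil => simp [hemp hc, PySem.Chars.strip, PySem.Chars.lstrip, PySem.Chars.rstrip]
  | cons x cur' =>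
    have hx : PySem.Chars.isspace x = false := hhead x (by simp [hc])
    simp only [PySem.Chars.strip, PySem.Chars.lstrip, List.cons_append,
      List.dropWhile_cons, hx, Bool.false_eq_true, if_false]
    rw [← List.cons_append, ← hc]
    simp only [PySem.Chars.rstrip, List.reverse_append]
    rw [List.dropWhile_append]
    have hdp : pend.reverse.dropWhile PySem.Chars.isspace = [] := by
      rw [List.dropWhile_eq_nil_iff]
      intro x hxm
      exact hws x (List.mem_reverse.mp hxm)
    simp only [hdp, List.isEmpty_nil, if_true]
    cases hr : cur.reverse with
    | nil => simp [List.reverse_eq_nil_iff.mp hr] at hc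
    | cons a t =>
      have ha : PySem.Chars.isspace a = false := by
        apply hlast
        rw [← List.head?_reverse, hr]
        rfl
      rw [List.dropWhile_cons, if_neg (by simp [ha]), ← hr, List.reverse_reverse]

theorem isspace_comma : PySem.Chars.isspace ',' = false := by decide

-- prepending whitespace to a string does not change its pieces
theorem pieces_ws_cons (c : Char) (hc : c ≠ ',') (hw : PySem.Chars.isspace c = true)
    (cs : List Char) : pieces (c :: cs) = pieces cs := by
  unfold pieces
  congr 1
  simp only [splitComma, if_neg hc]
  cases h : splitComma cs with
  | nil => exact absurd h (splitComma_ne_nil cs)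
  | cons a t =>
    simp [List.modifyHead, PySem.Chars.strip, PySem.Chars.lstrip, hw]

-- pieces of a comma-free stripped prefix
theorem pieces_affix (cur pend : List Char) (hinv : nsfInv cur pend) :
    pieces (cur ++ pend) = if cur ≠ [] then [cur] else [] := by
  obtain ⟨hnc, hws, hemp, hh, hl⟩ := hinv
  have hfree : ∀ c ∈ cur ++ pend, c ≠ ',' := by
    intro c hcm
    rcases List.mem_append.mp hcm with h | h
    · exact hnc c h
    · intro he; subst he; exact absurd (hws _ h) (by simp [isspace_comma])
  unfold pieces
  rw [splitComma_no_comma _ hfree]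
  rw [List.map_singleton, strip_affix cur pend ⟨hnc, hws, hemp, hh, hl⟩]
  cases cur <;> simp

-- B's per-character scan computes the pieces of the remaining input
theorem scan_eq (cs : List Char) : ∀ (parsed : List String) (cur pend : List Char),
    nsfInv cur pend →
    nsfFinish (cs.foldl nsfStep (parsed, cur, pend))
      = parsed ++ (pieces (cur ++ pend ++ cs)).map String.ofList := by
  induction cs with
  | nil =>
    intro parsed cur pend hinv
    rw [List.foldl_nil, List.append_nil, pieces_affix cur pend hinv]
    cases cur <;> simp [nsfFinish]
  | cons c rest ih =>
    intro parsed cur pend hinv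
    obtain ⟨hnc, hws, hemp, hhead, hlast⟩ := hinv
    rw [List.foldl_cons]
    by_cases hc : c = ','
    · subst hc
      have hstep : nsfStep (parsed, cur, pend) ',' =
          (if cur ≠ [] then parsed ++ [String.ofList cur] else parsed, [], []) := by
        simp [nsfStep]
      rw [hstep, ih _ [] [] nsfInv_nil]
      have hsplit : pieces (cur ++ pend ++ ',' :: rest)
          = (if cur ≠ [] then [cur] else []) ++ pieces rest := by
        unfold pieces
        rw [splitComma_append, List.map_append, List.filter_append]
        have := pieces_affix cur pend ⟨hnc, hws, hemp, hhead, hlast⟩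
        unfold pieces at this
        rw [this]
      rw [hsplit, List.map_append]
      cases cur <;> simp
    · by_cases hw : PySem.Chars.isspace c = true
      · cases hcur : cur with
        | nil =>
          subst hcur
          have hpend := hemp rfl
          subst hpend
          have hstep : nsfStep (parsed, ([] : List Char), ([] : List Char)) c
              = (parsed, [], []) := by
            simp [nsfStep, hc, hw]
          rw [hstep, ih parsed [] [] nsfInv_nil]
          simp only [List.nil_append]
          rw [pieces_ws_cons c hc hw rest]
        | cons x cur' =>
          subst hcur
          have hstep : nsfStep (parsed, x :: cur', pend) c
              = (parsed, x :: cur', pend ++ [c]) := by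
            simp [nsfStep, hc, hw]
          have hinv' : nsfInv (x :: cur') (pend ++ [c]) := by
            refine ⟨hnc, ?_, by simp, hhead, hlast⟩
            intro d hd
            rcases List.mem_append.mp hd with h | h
            · exact hws d h
            · simp at h; subst h; exact hw
          rw [hstep, ih parsed (x :: cur') (pend ++ [c]) hinv']
          have : x :: cur' ++ (pend ++ [c]) ++ rest = x :: cur' ++ pend ++ (c :: rest) := by
            simp
          rw [this]
      · have hw' : PySem.Chars.isspace c = false := by simpa using hw
        have hstep : nsfStep (parsed, cur, pend) c = (parsed, cur ++ pend ++ [c], []) := by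
          simp [nsfStep, hc, hw']
        have hinv' : nsfInv (cur ++ pend ++ [c]) [] := by
          refine ⟨?_, by simp, by simp, ?_, ?_⟩
          · intro d hd
            rcases List.mem_append.mp hd with h | h
            · rcases List.mem_append.mp h with h' | h'
              · exact hnc d h'
              · intro he; subst he; exact absurd (hws _ h') (by simp [isspace_comma])
            · simp at h; subst h; exact hc
          · intro h hh
            cases hcur : cur with
            | nil =>
              have := hemp hcur
              subst hcur; subst this
              simp at hh
              subst hh; exact hw'
            | cons x t =>
              subst hcur
              simp at hh
              subst hh
              exact hhead x (by simp)
          · intro h hh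
            rw [show cur ++ pend ++ [c] = (cur ++ pend) ++ [c] from by simp,
              List.getLast?_concat, Option.mem_some_iff] at hh
            subst hh; exact hw'
        rw [hstep, ih parsed (cur ++ pend ++ [c]) [] hinv']
        have : cur ++ pend ++ [c] ++ [] ++ rest = cur ++ pend ++ (c :: rest) := by simp
        rw [this]

-- one flag: B's scan = the flag's pieces
theorem nsfFlag_eq (parsed : List String) (flag : String) :
    nsfFlag parsed flag = parsed ++ (pieces flag.toList).map String.ofList := by
  have h := scan_eq flag.toList parsed [] [] nsfInv_nil
  simpa [nsfFinish, nsfFlag] using h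

-- B as a flatMap of per-flag pieces
theorem portB_eq (skill_flags : List String) (acc : List String) :
    skill_flags.foldl nsfFlag acc
    = acc ++ skill_flags.flatMap (fun flag => (pieces flag.toList).map String.ofList) := by
  induction skill_flags generalizing acc with
  | nil => simp
  | cons f t ih =>
    simp only [List.foldl_cons, List.flatMap_cons]
    rw [nsfFlag_eq, ih, List.append_assoc]

-- ===== VERDICT (by name: the statement is the Claim_ definition above) =====
theorem normalize_skill_flags_py_spec : Claim_equal_normalize_skill_flags_py := by
  intro skill_flags _
  unfold Spec_normalize_skill_flags_py normalize_skill_flags_py normalize_skill_flags_py_alt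
  rw [portA_eq, portB_eq]
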